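-- pv_equiv track=rewrite | github.com/LakMehta0210/2048-Sci-Comp | 2048-Sci-Comp-main/Main.py | slideUp
-- ===== SOURCE A (Python) =====
-- def slideUp(gameboard):
--     for col_ind in range(len(gameboard[0])):
--         column = [gameboard[k][col_ind] for k in range(len(gameboard))]
--         for i in range(len(column)):
--                 if column[i] == None:
--                     for x in range(i,len(column)):
--                         if column[x] != None:
--                             column[i] = column[x]
--                             column[x] = None
--                             break
--         for index in range(len(column)):
--             gameboard[index][col_ind] = column[index]
--     return gameboard
-- ===== SOURCE B (Python) =====
-- def slideUp(gameboard):
--     for c in range(len(gameboard[0])):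
--         vals = [row[c] for row in gameboard if row[c] is not None]
--         vals += [None] * (len(gameboard) - len(vals))
--         for row, v in zip(gameboard, vals):
--             row[c] = v
--     return gameboard
-- ===== Notes on version B (the rewrite author's own statement) =====
-- stated objective: faster
-- what changed: Per column, B filters the non-None entries in one pass and pads with Nones (write-back by zip), replacing A's per-cell inner scan that searches the rest of the column for each empty cell.
import Mathlib
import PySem

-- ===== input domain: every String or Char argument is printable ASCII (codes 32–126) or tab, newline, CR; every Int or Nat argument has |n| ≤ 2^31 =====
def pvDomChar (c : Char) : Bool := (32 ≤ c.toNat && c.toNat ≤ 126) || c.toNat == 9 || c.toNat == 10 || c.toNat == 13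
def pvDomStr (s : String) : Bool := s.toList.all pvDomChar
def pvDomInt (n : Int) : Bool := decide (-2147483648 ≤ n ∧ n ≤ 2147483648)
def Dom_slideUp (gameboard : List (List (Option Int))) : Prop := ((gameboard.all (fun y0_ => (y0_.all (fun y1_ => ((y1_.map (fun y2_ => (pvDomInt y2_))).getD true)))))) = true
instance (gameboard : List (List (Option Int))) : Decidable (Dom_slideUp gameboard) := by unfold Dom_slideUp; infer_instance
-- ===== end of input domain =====

-- B replaces A's per-empty-cell inner rescan of the column by a single filter-and-pad pass per column
-- (timed faster); both Pythons mutate `gameboard` in place the same way, the theorem is about the returned value.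

-- ===== PORT A =====
-- inner 'for x in range(i, len(column)): … break' of A
def pvFindSwap (column : List (Option Int)) (i : Int) (xs : List Int) : List (Option Int) :=
  match xs with
  | [] => column
  | x :: rest =>
    if PySem.List.pyGetD column x none ≠ none then
      (column.set i.toNat (PySem.List.pyGetD column x none)).set x.toNat none
    else pvFindSwap column i rest

-- body of A's 'for i in range(len(column))' loop
def pvSlideStep (col : List (Option Int)) (i : Int) : List (Option Int) :=
  if PySem.List.pyGetD col i none == none then
    pvFindSwap col i (PySem.List.pyRange i (col.length : Int) 1)
  else col

def pvSlideCol (column : List (Option Int)) : List (Option Int) :=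
  (PySem.List.pyRange 0 (column.length : Int) 1).foldl pvSlideStep column

-- 'column = [gameboard[k][col_ind] for k in range(len(gameboard))]'
def pvColumnOf (gb : List (List (Option Int))) (c : Int) : List (Option Int) :=
  (PySem.List.pyRange 0 (gb.length : Int) 1).map
    (fun k => PySem.List.pyGetD (PySem.List.pyGetD gb k []) c none)

-- 'for index in range(len(column)): gameboard[index][col_ind] = column[index]'
def pvWriteBack (gb : List (List (Option Int))) (c : Int) (col2 : List (Option Int)) :
    List (List (Option Int)) :=
  (PySem.List.pyRange 0 (col2.length : Int) 1).foldl
    (fun gb2 index =>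
      gb2.set index.toNat
        ((PySem.List.pyGetD gb2 index []).set c.toNat (PySem.List.pyGetD col2 index none)))
    gb

def pvStepA (gb : List (List (Option Int))) (c : Int) : List (List (Option Int)) :=
  pvWriteBack gb c (pvSlideCol (pvColumnOf gb c))

def slideUp (gameboard : List (List (Option Int))) : List (List (Option Int)) :=
  (PySem.List.pyRange 0 ((PySem.List.pyGetD gameboard 0 []).length : Int) 1).foldl
    pvStepA gameboard

-- ===== PORT B =====
-- one column of Source B: filter the non-None cells, pad with Nones, write back by zip
def pvStepB (gb : List (List (Option Int))) (c : Int) : List (List (Option Int)) :=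
  let vals := gb.filterMap (fun row => PySem.List.pyGetD row c none)
  let padded := vals.map some ++ List.replicate (gb.length - vals.length) none
  (gb.zip padded).map (fun rv => rv.1.set c.toNat rv.2)

def slideUp_alt (gameboard : List (List (Option Int))) : List (List (Option Int)) :=
  (PySem.List.pyRange 0 ((PySem.List.pyGetD gameboard 0 []).length : Int) 1).foldl
    pvStepB gameboard

-- ===== PRECONDITION & SPEC =====
-- Pre_ excludes exactly the inputs on which the Python A raises (IndexError): the empty board
-- (gameboard[0]) and boards where some row is shorter than the first row (gameboard[k][col_ind]).
def Pre_slideUp (gameboard : List (List (Option Int))) : Prop :=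
  gameboard ≠ [] ∧ ∀ row ∈ gameboard, (gameboard.headD []).length ≤ row.length
instance (gameboard : List (List (Option Int))) : Decidable (Pre_slideUp gameboard) := by
  unfold Pre_slideUp; infer_instance

def pvWitness_slideUp : List (List (Option Int)) := [[some 2, none], [none, some 3]]

def Spec_slideUp (gameboard : List (List (Option Int))) (out : List (List (Option Int))) : Prop := out = slideUp_alt gameboard
instance (gameboard : List (List (Option Int))) (out : List (List (Option Int))) : Decidable (Spec_slideUp gameboard out) := by unfold Spec_slideUp; infer_instance

-- ===== CLAIM (what is proved, stated in full; the proofs are below) =====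
def Claim_equal_slideUp : Prop := ∀ (gameboard : List (List (Option Int))), Dom_slideUp gameboard → Pre_slideUp gameboard → Spec_slideUp gameboard (slideUp gameboard)

-- ===== LEMMAS AND PROOFS =====

-- index and value of the first non-None entry
def pvFirstSome : List (Option Int) → Option (Nat × Int)
  | [] => none
  | some v :: _ => some (0, v)
  | none :: r => (pvFirstSome r).map (fun p => (p.1 + 1, p.2))

-- structural model of A's per-column slide
def pvG : List (Option Int) → List (Option Int)
  | [] => []
  | some v :: t => some v :: pvG t
  | none :: t =>
    match pvFirstSome t with
    | none => none :: pvG t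
    | some kv => some kv.2 :: pvG (t.set kv.1 none)
termination_by l => l.length
decreasing_by all_goals simp

def pvCompact (c : List (Option Int)) : List (Option Int) :=
  (c.filterMap id).map some ++ List.replicate (c.length - (c.filterMap id).length) none

lemma pv_take_set_of_le {α : Type} (l : List α) (n m : Nat) (a : α) (h : m ≤ n) :
    (l.set n a).take m = l.take m := by
  apply List.ext_getElem?
  intro j
  simp only [List.getElem?_take, List.getElem?_set]
  split_ifs <;> first | rfl | omega

lemma pv_drop_set_of_lt {α : Type} (l : List α) (n m : Nat) (a : α) (h : n < m) :
    (l.set n a).drop m = l.drop m := by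
  apply List.ext_getElem?
  intro j
  simp only [List.getElem?_drop, List.getElem?_set]
  split_ifs <;> first | rfl | omega

lemma pv_drop_set_of_le {α : Type} (l : List α) (n m : Nat) (a : α) (h : m ≤ n) :
    (l.set n a).drop m = (l.drop m).set (n - m) a := by
  apply List.ext_getElem?
  intro j
  simp only [List.getElem?_drop, List.getElem?_set, List.length_drop]
  split_ifs <;> first | rfl | omega

lemma pv_take_succ_set {α : Type} (l : List α) (i : Nat) (a : α) (h : i < l.length) :
    (l.set i a).take (i + 1) = l.take i ++ [a] := by
  rw [List.take_add_one, pv_take_set_of_le l i i a le_rfl]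
  simp [h]

lemma pv_firstSome_none {t : List (Option Int)} (h : pvFirstSome t = none) :
    t = List.replicate t.length none := by
  induction t with
  | nil => rfl
  | cons x t ih =>
    cases x with
    | some v => simp [pvFirstSome] at h
    | none =>
      simp only [pvFirstSome, Option.map_eq_none_iff] at h
      simpa [List.replicate_succ] using ih h

lemma pv_firstSome_some {t : List (Option Int)} {k : Nat} {v : Int}
    (h : pvFirstSome t = some (k, v)) :
    ∃ r, t = List.replicate k none ++ some v :: r := by
  induction t generalizing k with
  | nil => simp [pvFirstSome] at h
  | cons x t ih =>
    cases x with
    | some w =>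
      simp only [pvFirstSome, Option.some_inj, Prod.mk.injEq] at h
      obtain ⟨rfl, rfl⟩ := h
      exact ⟨t, rfl⟩
    | none =>
      simp only [pvFirstSome, Option.map_eq_some_iff] at h
      obtain ⟨⟨k0, v0⟩, hfs, hkv⟩ := h
      obtain ⟨rfl, rfl⟩ : k0 + 1 = k ∧ v0 = v := by
        simpa [Prod.ext_iff] using hkv
      obtain ⟨r, hr⟩ := ih hfs
      exact ⟨r, by simp [hr, List.replicate_succ]⟩

lemma pv_g_compact_aux (n : Nat) : ∀ t : List (Option Int), t.length ≤ n → pvG t = pvCompact t := by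
  induction n with
  | zero =>
    intro t ht
    have : t = [] := List.eq_nil_of_length_eq_zero (by omega)
    subst this
    simp [pvG, pvCompact]
  | succ n ih =>
    intro t ht
    match t with
    | [] => simp [pvG, pvCompact]
    | some v :: t' =>
      rw [pvG, ih t' (by simp at ht; omega)]
      have hle := List.length_filterMap_le id t'
      simp [pvCompact]
    | none :: t' =>
      cases hfs : pvFirstSome t' with
      | none =>
        rw [pvG]
        simp only [hfs]
        rw [ih t' (by simp at ht; omega)]
        have ht' := pv_firstSome_none hfs
        rw [ht']
        simp [pvCompact, List.replicate_succ]
      | some kv =>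
        obtain ⟨k, v⟩ := kv
        obtain ⟨r, hr⟩ := pv_firstSome_some hfs
        rw [pvG]
        simp only [hfs]
        have hset : t'.set k none = List.replicate k none ++ none :: r := by
          rw [hr]
          have : (List.replicate k (none : Option Int)).length = k := by simp
          rw [← this]
          simp
        rw [ih (t'.set k none) (by simp at ht ⊢; omega)]
        rw [hset, hr]
        have hle := List.length_filterMap_le id r
        simp [pvCompact, List.filterMap_append]

lemma pv_g_compact (t : List (Option Int)) : pvG t = pvCompact t :=
  pv_g_compact_aux t.length t le_rfl

lemma pv_find_eq (n : Nat) : ∀ (s : List (Option Int)) (i : Int) (x : Nat),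
    s.length - x = n → x ≤ s.length →
    pvFindSwap s i (PySem.List.pyRange (x : Int) (s.length : Int) 1) =
      (match pvFirstSome (s.drop x) with
       | none => s
       | some kv => (s.set i.toNat (some kv.2)).set (x + kv.1) none) := by
  induction n with
  | zero =>
    intro s i x hn hx
    have hx' : x = s.length := by omega
    subst hx'
    rw [PySem.List.pyRange_one_eq_nil le_rfl]
    simp [pvFindSwap, List.drop_length, pvFirstSome]
  | succ n ih =>
    intro s i x hn hx
    have hxlt : x < s.length := by omega
    have hdrop : s.drop x = s[x] :: s.drop (x + 1) := List.drop_eq_getElem_cons hxlt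
    rw [PySem.List.pyRange_one_cons (by exact_mod_cast hxlt)]
    rw [pvFindSwap]
    have hget : PySem.List.pyGetD s (x : Int) none = s[x] := by
      rw [PySem.List.pyGetD_natCast]
      exact List.getD_eq_getElem s none hxlt
    cases hsx : s[x] with
    | some v =>
      rw [hget, hsx]
      rw [if_pos (by simp)]
      rw [hdrop, hsx]
      simp [pvFirstSome]
    | none =>
      rw [hget, hsx]
      rw [if_neg (by simp)]
      have hcast : (x : Int) + 1 = ((x + 1 : Nat) : Int) := by push_cast; ring
      rw [hcast, ih s i (x + 1) (by omega) (by omega)]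
      rw [hdrop, hsx]
      cases hfs : pvFirstSome (s.drop (x + 1)) with
      | none => simp [pvFirstSome, hfs]
      | some kv =>
        simp only [pvFirstSome, hfs, Option.map_some]
        have : x + 1 + kv.1 = x + (kv.1 + 1) := by omega
        rw [this]

lemma pv_slide_eq (n : Nat) : ∀ (s : List (Option Int)) (i : Nat),
    s.length - i = n → i ≤ s.length →
    (PySem.List.pyRange (i : Int) (s.length : Int) 1).foldl pvSlideStep s =
      s.take i ++ pvG (s.drop i) := by
  induction n with
  | zero =>
    intro s i hn hi
    have hi' : i = s.length := by omega
    subst hi'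
    rw [PySem.List.pyRange_one_eq_nil le_rfl]
    simp [pvG, List.drop_length]
  | succ n ih =>
    intro s i hn hi
    have hilt : i < s.length := by omega
    have hdrop : s.drop i = s[i] :: s.drop (i + 1) := List.drop_eq_getElem_cons hilt
    rw [PySem.List.pyRange_one_cons (by exact_mod_cast hilt)]
    rw [List.foldl_cons]
    have hget : PySem.List.pyGetD s (i : Int) none = s[i] := by
      rw [PySem.List.pyGetD_natCast]
      exact List.getD_eq_getElem s none hilt
    have hcast : (i : Int) + 1 = ((i + 1 : Nat) : Int) := by push_cast; ring
    cases hsi : s[i] with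
    | some v =>
      have hstep : pvSlideStep s (i : Int) = s := by
        rw [pvSlideStep, hget, hsi]
        simp
      rw [hstep, hcast, ih s (i + 1) (by omega) (by omega)]
      rw [hdrop, hsi, pvG]
      rw [List.take_add_one]
      have : s[i]? = some (some v) := by rw [List.getElem?_eq_getElem hilt, hsi]
      simp [this]
    | none =>
      have hfind := pv_find_eq (s.length - i) s (i : Int) i rfl (by omega)
      rw [hdrop, hsi] at hfind
      have hstep0 : pvSlideStep s (i : Int) = pvFindSwap s (i : Int) (PySem.List.pyRange (i : Int) (s.length : Int) 1) := by
        rw [pvSlideStep, hget, hsi]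
        simp
      cases hfs : pvFirstSome (s.drop (i + 1)) with
      | none =>
        simp only [pvFirstSome, hfs, Option.map_none] at hfind
        rw [hstep0, hfind, hcast, ih s (i + 1) (by omega) (by omega)]
        rw [hdrop, hsi, pvG]
        simp only [hfs]
        rw [List.take_add_one]
        have : s[i]? = some none := by rw [List.getElem?_eq_getElem hilt, hsi]
        simp [this]
      | some kv =>
        obtain ⟨k, v⟩ := kv
        simp only [pvFirstSome, hfs, Option.map_some] at hfind
        set s' := (s.set (i : Int).toNat (some v)).set (i + (k + 1)) none with hs'
        have hslen : s'.length = s.length := by simp [hs']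
        rw [hstep0, hfind, hcast]
        rw [show ((s.length : Int)) = ((s'.length : Int)) by rw [hslen]]
        rw [ih s' (i + 1) (by omega) (by omega)]
        have htoNat : ((i : Int)).toNat = i := Int.toNat_natCast i
        have htake : s'.take (i + 1) = s.take i ++ [some v] := by
          rw [hs', htoNat, pv_take_set_of_le _ _ _ _ (by omega)]
          exact pv_take_succ_set s i (some v) hilt
        have hdrop' : s'.drop (i + 1) = (s.drop (i + 1)).set k none := by
          rw [hs', htoNat, pv_drop_set_of_le _ _ _ _ (by omega)]
          rw [pv_drop_set_of_lt _ _ _ _ (by omega)]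
          congr 1
          omega
        rw [htake, hdrop']
        rw [hdrop, hsi, pvG]
        simp only [hfs]
        simp

lemma pv_slideCol_eq (c : List (Option Int)) : pvSlideCol c = pvCompact c := by
  have h := pv_slide_eq c.length c 0 (by omega) (Nat.zero_le _)
  simp only [Nat.cast_zero, List.take_zero, List.drop_zero, List.nil_append] at h
  rw [pvSlideCol, h, pv_g_compact]

lemma pv_writeBack_eq (n : Nat) : ∀ (gb : List (List (Option Int))) (c : Int)
    (col2 : List (Option Int)) (i : Nat),
    gb.length = col2.length → col2.length - i = n → i ≤ col2.length →
    (PySem.List.pyRange (i : Int) (col2.length : Int) 1).foldl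
      (fun gb2 index =>
        gb2.set index.toNat
          ((PySem.List.pyGetD gb2 index []).set c.toNat (PySem.List.pyGetD col2 index none)))
      gb =
    gb.take i ++ ((gb.drop i).zip (col2.drop i)).map (fun rv => rv.1.set c.toNat rv.2) := by
  induction n with
  | zero =>
    intro gb c col2 i hlen hn hi
    have hi' : i = col2.length := by omega
    subst hi'
    rw [PySem.List.pyRange_one_eq_nil le_rfl]
    simp [List.drop_length]
    omega
  | succ n ih =>
    intro gb c col2 i hlen hn hi
    have hilt : i < col2.length := by omega
    have higb : i < gb.length := by omega
    rw [PySem.List.pyRange_one_cons (by exact_mod_cast hilt)]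
    rw [List.foldl_cons]
    have hg1 : PySem.List.pyGetD gb (i : Int) [] = gb[i] := by
      rw [PySem.List.pyGetD_natCast]
      exact List.getD_eq_getElem gb [] higb
    have hg2 : PySem.List.pyGetD col2 (i : Int) none = col2[i] := by
      rw [PySem.List.pyGetD_natCast]
      exact List.getD_eq_getElem col2 none hilt
    have htoNat : ((i : Int)).toNat = i := Int.toNat_natCast i
    rw [hg1, hg2, htoNat]
    set gb' := gb.set i (gb[i].set c.toNat col2[i]) with hgb'
    have hcast : (i : Int) + 1 = ((i + 1 : Nat) : Int) := by push_cast; ring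
    rw [hcast, ih gb' c col2 (i + 1) (by simp [hgb']; omega) (by omega) (by omega)]
    have htake : gb'.take (i + 1) = gb.take i ++ [gb[i].set c.toNat col2[i]] :=
      pv_take_succ_set gb i _ higb
    have hdrop' : gb'.drop (i + 1) = gb.drop (i + 1) := pv_drop_set_of_lt gb i (i + 1) _ (by omega)
    rw [htake, hdrop']
    rw [List.drop_eq_getElem_cons higb, List.drop_eq_getElem_cons hilt,
      List.zip_cons_cons, List.map_cons, List.append_assoc, List.singleton_append]

lemma pv_step_eq (gb : List (List (Option Int))) (c : Int) : pvStepA gb c = pvStepB gb c := by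
  have hcol : pvColumnOf gb c = gb.map (fun row => PySem.List.pyGetD row c none) := by
    rw [pvColumnOf]
    rw [show (fun k => PySem.List.pyGetD (PySem.List.pyGetD gb k []) c none) =
        ((fun row => PySem.List.pyGetD row c none) ∘ (fun k => PySem.List.pyGetD gb k [])) from rfl]
    rw [← List.map_map]
    rw [PySem.List.map_pyGetD_pyRange_zero']
  have hvlen := List.length_filterMap_le (fun row => PySem.List.pyGetD row c none) gb
  have hcompact : pvCompact (pvColumnOf gb c) =
      (gb.filterMap (fun row => PySem.List.pyGetD row c none)).map some ++
        List.replicate (gb.length - (gb.filterMap (fun row => PySem.List.pyGetD row c none)).length) none := by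
    rw [hcol, pvCompact]
    rw [List.filterMap_map]
    simp
  have hplen : ((gb.filterMap (fun row => PySem.List.pyGetD row c none)).map some ++
      List.replicate (gb.length - (gb.filterMap (fun row => PySem.List.pyGetD row c none)).length) none).length
      = gb.length := by
    simp
    omega
  rw [pvStepA, pv_slideCol_eq, hcompact]
  have hwb := pv_writeBack_eq (((gb.filterMap (fun row => PySem.List.pyGetD row c none)).map some ++
      List.replicate (gb.length - (gb.filterMap (fun row => PySem.List.pyGetD row c none)).length) none).length)
      gb c _ 0 hplen.symm rfl (Nat.zero_le _)
  simp only [Nat.cast_zero, List.take_zero, List.drop_zero, List.nil_append] at hwb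
  rw [pvWriteBack, hwb, pvStepB]

lemma pv_main (gb : List (List (Option Int))) : slideUp gb = slideUp_alt gb := by
  have h : pvStepA = pvStepB := funext fun gb => funext fun c => pv_step_eq gb c
  simp only [slideUp, slideUp_alt, h]

-- ===== VERDICT (by name: the statement is the Claim_ definition above) =====
theorem slideUp_spec : Claim_equal_slideUp := by
  intro gb _ _
  unfold Spec_slideUp
  exact pv_main gb
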